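-- pv_equiv track=rewrite | github.com/mat2ja/napredni-python | kol/K1/zad3.py | naj_pon
-- ===== SOURCE A (Python) =====
-- def naj_pon(redovi):
--     max_repeat = 0
--     for red in redovi:
--         local_repeat = 1
--         for i in range(1, len(red)):
--             prev = red[i-1]
--             curr = red[i]
--             if prev == curr:
--                 local_repeat += 1
--                 max_repeat = max(max_repeat, local_repeat)
--             else:
--                 local_repeat = 1
--
--     return max_repeat
-- ===== SOURCE B (Python) =====
-- def _runs(red):
--     # lengths of maximal runs of equal consecutive values, in order
--     if not red:
--         return []
--     out = []
--     v = red[0]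
--     k = 1
--     for x in red[1:]:
--         if x == v:
--             k += 1
--         else:
--             out.append(k)
--             v = x
--             k = 1
--     out.append(k)
--     return out
--
--
-- def naj_pon(redovi):
--     best = 0
--     for red in redovi:
--         for n in _runs(red):
--             if n >= 2:
--                 best = max(best, n)
--     return best
-- ===== Notes on version B (the rewrite author's own statement) =====
-- stated objective: alternative
-- what changed: B first decomposes each row into the list of maximal run lengths with a helper, then takes the maximum over run lengths >= 2, instead of A's index-based prev/curr counter interleaved with a running max; the run-length pass avoids per-index range/indexing overhead (measured constant-factor speedup).
import Mathlib
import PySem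

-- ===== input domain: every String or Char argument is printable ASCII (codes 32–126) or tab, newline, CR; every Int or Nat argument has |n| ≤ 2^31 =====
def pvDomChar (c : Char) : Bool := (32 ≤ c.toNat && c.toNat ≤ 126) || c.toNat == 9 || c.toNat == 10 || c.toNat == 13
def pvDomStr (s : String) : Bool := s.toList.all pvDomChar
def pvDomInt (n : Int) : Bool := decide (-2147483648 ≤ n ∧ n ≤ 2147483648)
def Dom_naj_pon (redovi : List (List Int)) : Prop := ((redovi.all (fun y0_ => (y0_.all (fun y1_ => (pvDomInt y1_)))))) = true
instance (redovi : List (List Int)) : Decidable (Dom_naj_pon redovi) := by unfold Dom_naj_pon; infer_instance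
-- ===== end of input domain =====

-- B computes each row's maximal-run lengths first, then maxes over runs of length ≥ 2 (alternative decomposition; same cost).

-- ===== PORT A =====
def naj_pon (redovi : List (List Int)) : Int :=
  redovi.foldl (fun max_repeat red =>
    ((PySem.List.pyRange 1 (red.length : Int) 1).foldl
      (fun (st : Int × Int) i =>
        let prev := PySem.List.pyGetD red (i - 1) 0
        let curr := PySem.List.pyGetD red i 0
        if prev = curr then (max st.1 (st.2 + 1), st.2 + 1) else (st.1, 1))
      (max_repeat, 1)).1) 0

-- ===== PORT B =====
-- _runs from Source B: loop with accumulator (out, v, k), final append of k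
def runsOf (red : List Int) : List Int :=
  match red with
  | [] => []
  | x :: xs =>
    let s := xs.foldl
      (fun (s : List Int × Int × Int) y =>
        if y = s.2.1 then (s.1, s.2.1, s.2.2 + 1) else (s.1 ++ [s.2.2], y, 1))
      ([], x, 1)
    s.1 ++ [s.2.2]

def naj_pon_alt (redovi : List (List Int)) : Int :=
  redovi.foldl (fun best red =>
    (runsOf red).foldl (fun b n => if 2 ≤ n then max b n else b) best) 0

-- ===== PRECONDITION & SPEC =====
def Spec_naj_pon (redovi : List (List Int)) (out : Int) : Prop := out = naj_pon_alt redovi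
instance (redovi : List (List Int)) (out : Int) : Decidable (Spec_naj_pon redovi out) := by unfold Spec_naj_pon; infer_instance

-- ===== CLAIM (what is proved, stated in full; the proofs are below) =====
def Claim_equal_naj_pon : Prop := ∀ (redovi : List (List Int)), Dom_naj_pon redovi → Spec_naj_pon redovi (naj_pon redovi)

-- ===== LEMMAS AND PROOFS =====

-- recursive characterisation of runsOf, used only by the proofs
def runsAux : List Int → Int → Int → List Int
  | [], _, k => [k]
  | y :: ys, v, k => if y = v then runsAux ys v (k + 1) else k :: runsAux ys y 1

lemma runsFold_eq_runsAux (xs : List Int) : ∀ (out : List Int) (v k : Int),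
    (let s := xs.foldl
      (fun (s : List Int × Int × Int) y =>
        if y = s.2.1 then (s.1, s.2.1, s.2.2 + 1) else (s.1 ++ [s.2.2], y, 1))
      (out, v, k)
     s.1 ++ [s.2.2]) = out ++ runsAux xs v k := by
  induction xs with
  | nil => intro out v k; simp [runsAux]
  | cons y ys ih =>
    intro out v k
    by_cases h : y = v
    · simpa [runsAux, h] using ih out v (k + 1)
    · simpa [runsAux, h] using ih (out ++ [k]) y 1

lemma runsOf_cons (x : Int) (xs : List Int) : runsOf (x :: xs) = runsAux xs x 1 := by
  simpa [runsOf] using runsFold_eq_runsAux xs [] x 1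

-- head of runsAux is at least the incoming count
lemma runsAux_head (xs : List Int) : ∀ (v k : Int),
    ∃ n t, runsAux xs v k = n :: t ∧ k ≤ n := by
  induction xs with
  | nil => intro v k; exact ⟨k, [], rfl, le_refl k⟩
  | cons y ys ih =>
    intro v k
    by_cases h : y = v
    · obtain ⟨n, t, he, hn⟩ := ih v (k + 1)
      refine ⟨n, t, ?_, by omega⟩
      rw [runsAux, if_pos h, he]
    · refine ⟨k, runsAux ys y 1, ?_, le_refl k⟩
      rw [runsAux, if_neg h]

-- A's prev/curr scan rephrased over (previous value, remaining tail)
def pairsFold : List Int → Int → (Int × Int) → Int × Int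
  | [], _, st => st
  | y :: ys, v, st =>
    pairsFold ys y (if v = y then (max st.1 (st.2 + 1), st.2 + 1) else (st.1, 1))

lemma pairsFold_cons (y : Int) (ys : List Int) (v : Int) (st : Int × Int) :
    pairsFold (y :: ys) v st
      = pairsFold ys y (if v = y then (max st.1 (st.2 + 1), st.2 + 1) else (st.1, 1)) := rfl

lemma runsAux_cons (y : Int) (ys : List Int) (v k : Int) :
    runsAux (y :: ys) v k = if y = v then runsAux ys v (k + 1) else k :: runsAux ys y 1 := rfl

-- A's index loop over pre ++ v :: rest, starting at index |pre| + 1, equals pairsFold rest v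
lemma index_loop_eq_pairsFold (rest : List Int) : ∀ (pre : List Int) (v : Int) (st : Int × Int),
    ((PySem.List.pyRange ((pre.length : Int) + 1) (((pre ++ v :: rest).length : Int)) 1).foldl
      (fun (st : Int × Int) i =>
        let prev := PySem.List.pyGetD (pre ++ v :: rest) (i - 1) 0
        let curr := PySem.List.pyGetD (pre ++ v :: rest) i 0
        if prev = curr then (max st.1 (st.2 + 1), st.2 + 1) else (st.1, 1))
      st) = pairsFold rest v st := by
  induction rest with
  | nil =>
    intro pre v st
    rw [PySem.List.pyRange_one_eq_nil (by simp)]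
    simp [pairsFold]
  | cons y ys ih =>
    intro pre v st
    have hab : (pre.length : Int) + 1 < (((pre ++ v :: y :: ys).length : Nat) : Int) := by
      push_cast [List.length_append, List.length_cons]; omega
    rw [PySem.List.pyRange_one_cons hab, List.foldl_cons]
    have hprev : PySem.List.pyGetD (pre ++ v :: y :: ys) ((pre.length : Int) + 1 - 1) 0 = v := by
      have h1 : ((pre.length : Int) + 1 - 1) = ((pre.length : Nat) : Int) := by ring
      rw [h1, PySem.List.pyGetD_natCast]
      simp [List.getD]
    have hcurr : PySem.List.pyGetD (pre ++ v :: y :: ys) ((pre.length : Int) + 1) 0 = y := by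
      have h2 : ((pre.length : Int) + 1) = (((pre.length + 1 : Nat)) : Int) := by push_cast; ring
      rw [h2, PySem.List.pyGetD_natCast]
      simp [List.getD]
    simp only [hprev, hcurr]
    have hre : pre ++ v :: y :: ys = (pre ++ [v]) ++ y :: ys := by simp
    have hl : (pre.length : Int) + 1 + 1 = ((pre ++ [v]).length : Int) + 1 := by
      push_cast [List.length_append, List.length_cons, List.length_nil]; ring
    rw [hre, hl, ih (pre ++ [v]) y]
    rw [pairsFold_cons]

-- A's scan with the in-run invariant equals B's max over the run lengths
lemma pairsFold_eq_runs (xs : List Int) : ∀ (v k m : Int), 1 ≤ k → (2 ≤ k → k ≤ m) →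
    (pairsFold xs v (m, k)).1 = (runsAux xs v k).foldl (fun b n => if 2 ≤ n then max b n else b) m := by
  induction xs with
  | nil =>
    intro v k m hk hkm
    simp only [pairsFold, runsAux, List.foldl_cons, List.foldl_nil]
    split_ifs with h
    · have := hkm h; omega
    · rfl
  | cons y ys ih =>
    intro v k m hk hkm
    by_cases h : v = y
    · subst h
      rw [pairsFold_cons, if_pos rfl, runsAux_cons, if_pos rfl]
      rw [ih v (k + 1) (max m (k + 1)) (by omega) (by omega)]
      obtain ⟨n, t, he, hn⟩ := runsAux_head ys v (k + 1)
      rw [he, List.foldl_cons, List.foldl_cons]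
      have h2n : (2 : Int) ≤ n := by omega
      rw [if_pos h2n, if_pos h2n]
      congr 1
      omega
    · rw [pairsFold_cons, if_neg h, runsAux_cons, if_neg (fun hh => h hh.symm), List.foldl_cons]
      rw [ih y 1 m (by omega) (by omega)]
      congr 1
      split_ifs with h2
      · exact (max_eq_left (hkm h2)).symm
      · rfl

-- per-row equality of the two inner computations
lemma row_eq (red : List Int) (m : Int) :
    ((PySem.List.pyRange 1 (red.length : Int) 1).foldl
      (fun (st : Int × Int) i =>
        let prev := PySem.List.pyGetD red (i - 1) 0
        let curr := PySem.List.pyGetD red i 0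
        if prev = curr then (max st.1 (st.2 + 1), st.2 + 1) else (st.1, 1))
      (m, 1)).1
    = (runsOf red).foldl (fun b n => if 2 ≤ n then max b n else b) m := by
  cases red with
  | nil => simp [PySem.List.pyRange_one_eq_nil, runsOf]
  | cons x xs =>
    have h := index_loop_eq_pairsFold xs [] x (m, 1)
    simp only [List.nil_append, List.length_nil, Nat.cast_zero, zero_add] at h
    rw [runsOf_cons]
    exact (congrArg Prod.fst h).trans (pairsFold_eq_runs xs x 1 m (by omega) (by omega))

lemma naj_pon_eq_alt (redovi : List (List Int)) : naj_pon redovi = naj_pon_alt redovi := by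
  unfold naj_pon naj_pon_alt
  induction redovi using List.reverseRecOn with
  | nil => rfl
  | append_singleton rs r ih =>
    rw [List.foldl_append, List.foldl_append, List.foldl_cons, List.foldl_nil,
      List.foldl_cons, List.foldl_nil, ih, row_eq]

-- ===== VERDICT (by name: the statement is the Claim_ definition above) =====
theorem naj_pon_spec : Claim_equal_naj_pon := fun redovi _ => naj_pon_eq_alt redovi
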